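-- pv_equiv track=rewrite | github.com/rmarinbe/argsfuzz | argsfuzz.py | _format_csv_range
-- ===== SOURCE A (Python) =====
-- from typing import Dict, List, Set, Tuple, Optional, Any, Callable
--
-- def _format_csv_range(numbers: List[int]) -> str:
--     """Format list of numbers as CSV range (e.g., 0,2-5,8)
--
--     Args:
--         numbers: List of integers
--
--     Returns:
--         Formatted range string with sorted, deduplicated numbers
--     """
--     if not numbers:
--         return ""
--
--     # Sort and deduplicate
--     unique_sorted = sorted(set(numbers))
--
--     if len(unique_sorted) == 1:
--         return str(unique_sorted[0])
--
--     # Build ranges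
--     ranges = []
--     start = unique_sorted[0]
--     prev = start
--
--     for num in unique_sorted[1:]:
--         if num == prev + 1:
--             # Continue range
--             prev = num
--         else:
--             # End of range
--             if start == prev:
--                 ranges.append(str(start))
--             else:
--                 ranges.append(f"{start}-{prev}")
--             start = num
--             prev = num
--
--     # Add final range
--     if start == prev:
--         ranges.append(str(start))
--     else:
--         ranges.append(f"{start}-{prev}")
--
--     return ",".join(ranges)
-- ===== SOURCE B (Python) =====
-- from typing import List
--
--
-- def _format_csv_range(numbers: List[int]) -> str:
--     """Format list of numbers as CSV range (e.g., 0,2-5,8).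
--
--     Groups the deduplicated sorted values by the value-minus-index key:
--     along a maximal run of consecutive integers that key is constant, so
--     each group is exactly one CSV range.
--     """
--     pairs = list(enumerate(sorted(set(numbers))))
--     parts = []
--     i = 0
--     while i < len(pairs):
--         key = pairs[i][1] - pairs[i][0]
--         j = i + 1
--         while j < len(pairs) and pairs[j][1] - pairs[j][0] == key:
--             j += 1
--         first, last = pairs[i][1], pairs[j - 1][1]
--         parts.append(str(first) if j - i == 1 else f"{first}-{last}")
--         i = j
--     return ",".join(parts)
-- ===== Notes on version B (the rewrite author's own statement) =====
-- stated objective: alternative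
-- what changed: Replaces A's start/prev boundary-tracking loop with grouping the enumerated sorted-deduplicated values by the constant value-minus-index key: each key-group is one maximal consecutive run, formatted from its first/last elements; the empty and singleton special cases disappear.
import Mathlib
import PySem

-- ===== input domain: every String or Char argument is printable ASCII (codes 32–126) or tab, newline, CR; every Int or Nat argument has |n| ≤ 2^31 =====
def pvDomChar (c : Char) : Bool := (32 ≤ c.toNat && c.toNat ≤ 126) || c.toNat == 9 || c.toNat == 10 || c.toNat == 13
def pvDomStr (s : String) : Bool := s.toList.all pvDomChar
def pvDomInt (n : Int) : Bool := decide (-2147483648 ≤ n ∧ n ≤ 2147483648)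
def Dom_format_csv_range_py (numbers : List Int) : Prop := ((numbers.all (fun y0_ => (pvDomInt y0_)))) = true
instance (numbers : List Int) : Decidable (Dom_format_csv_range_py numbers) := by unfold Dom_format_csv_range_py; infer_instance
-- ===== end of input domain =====

-- B groups the enumerated sorted-deduplicated values by the value-minus-index key (a maximal
-- consecutive run per group) instead of A's explicit start/prev boundary-tracking loop.

-- ===== PORT A =====
-- "str(start)" / f"{start}-{prev}" formatting shared by A's loop body and its final append
def pvFmt (s p : Int) : String :=
  if s == p then PySem.Int.toStr s else PySem.Int.toStr s ++ "-" ++ PySem.Int.toStr p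

-- A's 'for num in unique_sorted[1:]' loop over state (ranges, start, prev); the base case is
-- A's final 'Add final range' append after the loop.
def loopA (rs : List String) (s p : Int) : List Int → List String
  | [] => rs ++ [pvFmt s p]
  | n :: t => if n = p + 1 then loopA rs s n t else loopA (rs ++ [pvFmt s p]) n n t

def format_csv_range_py (numbers : List Int) : String :=
  if numbers = [] then ""
  else
    let us := PySem.List.sorted (PySem.Set.ofList numbers) (fun x => x) false
    if us.length = 1 then PySem.Int.toStr (PySem.List.pyGetD us 0 0)
    else
      PySem.Str.join ","
        (loopA [] (PySem.List.pyGetD us 0 0) (PySem.List.pyGetD us 0 0)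
          (PySem.List.slice us (some 1) none))

-- ===== PORT B =====
-- the groupby key: value minus index
def pvKey (q : Int × Int) : Int := q.2 - q.1

-- B's outer while loop: split the enumerated list into maximal blocks of equal key
-- (the inner 'while j < len(pairs) and pairs[j][1]-pairs[j][0] == key' scan is the takeWhile/dropWhile)
def pvGroupRuns : List (Int × Int) → List (List (Int × Int))
  | [] => []
  | p :: t =>
    (p :: t.takeWhile (fun q => pvKey q == pvKey p)) ::
      pvGroupRuns (t.dropWhile (fun q => pvKey q == pvKey p))
termination_by l => l.length
decreasing_by
  simpa using Nat.lt_succ_of_le (List.length_dropWhile_le _ _)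

-- B's per-group formatting from the group's first and last values
def pvPart (g : List (Int × Int)) : String :=
  let v := g.map Prod.snd
  if v.length = 1 then PySem.Int.toStr (v.headD 0)
  else PySem.Int.toStr (v.headD 0) ++ "-" ++ PySem.Int.toStr (v.getLastD 0)

def format_csv_range_py_alt (numbers : List Int) : String :=
  PySem.Str.join ","
    ((pvGroupRuns
        (PySem.List.enumerate (PySem.List.sorted (PySem.Set.ofList numbers) (fun x => x) false) 0)).map
      pvPart)

-- ===== PRECONDITION & SPEC =====
def Spec_format_csv_range_py (numbers : List Int) (out : String) : Prop := out = format_csv_range_py_alt numbers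
instance (numbers : List Int) (out : String) : Decidable (Spec_format_csv_range_py numbers out) := by unfold Spec_format_csv_range_py; infer_instance

-- ===== CLAIM (what is proved, stated in full; the proofs are below) =====
def Claim_equal_format_csv_range_py : Prop := ∀ (numbers : List Int), Dom_format_csv_range_py numbers → Spec_format_csv_range_py numbers (format_csv_range_py numbers)

-- ===== LEMMAS AND PROOFS =====

-- maximal consecutive run: (prefix of values p+1, p+2, …, rest)
def pvRun (p : Int) : List Int → List Int × List Int
  | [] => ([], [])
  | n :: t => if n = p + 1 then ((pvRun n t).1.cons n, (pvRun n t).2) else ([], n :: t)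

-- reference formatter both ports are reduced to
def pvRuns (s p : Int) : List Int → List String
  | [] => [pvFmt s p]
  | n :: t => if n = p + 1 then pvRuns s n t else pvFmt s p :: pvRuns n n t

theorem pvGetLastD_cons (a : List Int) (x y : Int) :
    (x :: a).getLast?.getD y = a.getLast?.getD x := by
  cases a with
  | nil => rfl
  | cons b l =>
    simp [List.getLast?_cons_cons]
    induction l generalizing b <;> simp_all [List.getLast?_cons_cons]

theorem pvGetLastD_mem (a : List Int) (d : Int) (h : a ≠ []) : a.getLast?.getD d ∈ a := by
  cases a with
  | nil => exact absurd rfl h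
  | cons b l =>
    rw [List.getLast?_cons, Option.getD_some, ← List.getLastD_eq_getLast?]
    exact List.getLastD_mem_cons

theorem loopA_eq (t : List Int) : ∀ (rs : List String) (s p : Int),
    loopA rs s p t = rs ++ pvRuns s p t := by
  induction t with
  | nil => intro rs s p; simp [loopA, pvRuns]
  | cons n t ih =>
    intro rs s p
    by_cases h : n = p + 1 <;> simp [loopA, pvRuns, h, ih]

theorem pvRun_append (t : List Int) : ∀ p, (pvRun p t).1 ++ (pvRun p t).2 = t := by
  induction t with
  | nil => intro p; simp [pvRun]
  | cons n t ih =>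
    intro p
    by_cases h : n = p + 1 <;> simp [pvRun, h, ih]

theorem pvRuns_eq (t : List Int) : ∀ s p,
    pvRuns s p t = pvFmt s ((pvRun p t).1.getLastD p) ::
      (match (pvRun p t).2 with
       | [] => []
       | n :: t' => pvRuns n n t') := by
  induction t with
  | nil => intro s p; simp [pvRuns, pvRun]
  | cons n t ih =>
    intro s p
    by_cases h : n = p + 1 <;> simp [pvRuns, pvRun, h, ih, pvGetLastD_cons]

theorem pvSpan_eq (t : List Int) : ∀ (p i : Int), List.Pairwise (· < ·) (p :: t) →
    (List.takeWhile (fun q => pvKey q == pvKey (i, p)) (PySem.List.enumerate t (i + 1))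
        = PySem.List.enumerate (pvRun p t).1 (i + 1)) ∧
    (List.dropWhile (fun q => pvKey q == pvKey (i, p)) (PySem.List.enumerate t (i + 1))
        = PySem.List.enumerate (pvRun p t).2 (i + 1 + (pvRun p t).1.length)) := by
  induction t with
  | nil => intro p i _; simp [pvRun, PySem.List.enumerate]
  | cons n t ih =>
    intro p i hp
    have hpn : p < n := (List.pairwise_cons.mp hp).1 n (by simp)
    have hpt : List.Pairwise (· < ·) (n :: t) := (List.pairwise_cons.mp hp).2
    by_cases h : n = p + 1
    · subst h
      have hk : pvKey (i, p) = pvKey (i + 1, p + 1) := by simp [pvKey]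
      obtain ⟨h1, h2⟩ := ih (p + 1) (i + 1) hpt
      rw [hk] at *
      have htrue : (pvKey (i + 1, p + 1) == pvKey (i + 1, p + 1)) = true := by simp
      constructor
      · rw [PySem.List.enumerate_cons, List.takeWhile_cons, htrue]
        simp only [pvRun, if_true, PySem.List.enumerate_cons, List.cons.injEq]
        exact ⟨trivial, h1⟩
      · rw [PySem.List.enumerate_cons, List.dropWhile_cons, htrue]
        rw [h2]
        simp only [pvRun, if_true]
        congr 1
        simp only [List.length_cons]
        push_cast
        omega
    · have hkey : ((pvKey (i + 1, n) == pvKey (i, p)) = false) := by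
        simp [pvKey]; omega
      constructor
      · simp [PySem.List.enumerate_cons, hkey, pvRun, h]
      · simp [PySem.List.enumerate_cons, hkey, pvRun, h]

theorem pvGroupRuns_eq (N : Nat) : ∀ (t : List Int), t.length ≤ N → ∀ (p i : Int),
    List.Pairwise (· < ·) (p :: t) →
    (pvGroupRuns (PySem.List.enumerate (p :: t) i)).map pvPart = pvRuns p p t := by
  induction N with
  | zero =>
    intro t ht p i hp
    have : t = [] := List.length_eq_zero_iff.mp (Nat.le_zero.mp ht)
    subst this
    simp [PySem.List.enumerate_cons, PySem.List.enumerate_nil, pvGroupRuns, pvPart, pvRuns, pvFmt]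
  | succ N ih =>
    intro t ht p i hp
    have hsplit := pvSpan_eq t p i hp
    have happ := pvRun_append t p
    rw [PySem.List.enumerate_cons]
    rw [pvGroupRuns, hsplit.1, hsplit.2]
    rw [pvRuns_eq, List.map_cons]
    refine congrArg₂ List.cons ?_ ?_
    · -- first group formats to pvFmt p (getLastD …)
      cases ha : (pvRun p t).1 with
      | nil => simp [pvPart, PySem.List.enumerate_nil, pvFmt]
      | cons c a' =>
        have hmem : (c :: a').getLast?.getD p ∈ t := by
          have hm1 : (c :: a').getLast?.getD p ∈ (pvRun p t).1 := by
            rw [ha]; exact pvGetLastD_mem _ _ (by simp)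
          have hm2 := List.mem_append_left (pvRun p t).2 hm1
          rw [happ] at hm2; exact hm2
        have hne : p ≠ (c :: a').getLast?.getD p :=
          ne_of_lt ((List.pairwise_cons.mp hp).1 _ hmem)
        simp only [pvPart, pvFmt, List.map_cons, PySem.List.map_snd_enumerate]
        simp only [List.getLastD_eq_getLast?, pvGetLastD_cons]
        rw [pvGetLastD_cons] at hne
        simp only [List.length_cons, if_neg (by omega : ¬ (a'.length + 1 + 1 = 1)), beq_iff_eq]
        split_ifs with hpe
        · exact absurd hpe hne
        · rfl
    · -- rest of the groups
      cases hb : (pvRun p t).2 with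
      | nil => simp [PySem.List.enumerate_nil, pvGroupRuns]
      | cons n' t' =>
        have hsuf : (n' :: t') <:+ t := ⟨(pvRun p t).1, by rw [hb] at happ; exact happ⟩
        have hsub : List.Pairwise (· < ·) (n' :: t') :=
          hp.sublist (hsuf.sublist.trans (List.sublist_cons_self _ _))
        have hlen : t'.length ≤ N := by
          have h0 := congrArg List.length happ
          rw [hb] at h0
          simp [List.length_append, List.length_cons] at h0
          omega
        exact ih t' hlen n' _ hsub

-- ===== VERDICT (by name: the statement is the Claim_ definition above) =====
theorem format_csv_range_py_spec : Claim_equal_format_csv_range_py := by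
  intro numbers _
  unfold Spec_format_csv_range_py format_csv_range_py format_csv_range_py_alt
  by_cases hnil : numbers = []
  · subst hnil
    simp [PySem.Set.ofList, PySem.List.sorted, PySem.List.enumerate_nil, pvGroupRuns]
    rfl
  · rw [if_neg hnil]
    have hus : PySem.List.sorted (PySem.Set.ofList numbers) (fun x => x) false ≠ [] := by
      rw [Ne, PySem.List.sorted_eq_nil_iff]
      intro h
      obtain ⟨x, xs, rfl⟩ := List.exists_cons_of_ne_nil hnil
      have hx : x ∈ PySem.Set.ofList (x :: xs) :=
        (PySem.Set.mem_ofList (x :: xs) x).mpr (by simp)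
      simp [h] at hx
    obtain ⟨u, rest, hcons⟩ := List.exists_cons_of_ne_nil hus
    have hpw : List.Pairwise (· < ·) (u :: rest) := by
      rw [← hcons]; exact PySem.List.sorted_ofList_pairwise_lt numbers
    rw [hcons]
    rw [pvGroupRuns_eq rest.length rest le_rfl u 0 hpw]
    by_cases h1 : (u :: rest).length = 1
    · have : rest = [] := by simpa using h1
      subst this
      simp [PySem.List.pyGetD, PySem.List.pyIdx?, PySem.List.pyGet?, pvRuns, pvFmt, PySem.Str.join]
      rfl
    · rw [if_neg h1, PySem.List.slice_from_one]
      simp only [List.tail_cons]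
      rw [loopA_eq]
      simp [PySem.List.pyGetD, PySem.List.pyIdx?, PySem.List.pyGet?]
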